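-- pv_equiv track=rewrite | github.com/sil-ai/aqua-api | utils/eflomal_scoring.py | build_reverse_dictionary
-- ===== SOURCE A (Python) =====
-- from collections import defaultdict
-- from typing import Dict, List, Tuple
--
-- def build_reverse_dictionary(
--     dictionary: Dict[Tuple[str, str], Dict],
--     min_count: int = 3,
-- ) -> Dict[str, List[Tuple[str, int]]]:
--     """Index the dictionary by target word: tgt_norm -> [(src_norm, count), ...]
--     sorted by count descending.
--
--     Only pairs with count >= min_count are kept to filter low-signal noise.
--     Used by detect_missing_words_for_verse to find whether a target word has
--     known source equivalents that are absent from the current verse.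
--     """
--     result: Dict[str, List[Tuple[str, int]]] = defaultdict(list)
--     for (src_norm, tgt_norm), info in dictionary.items():
--         if info["count"] >= min_count:
--             result[tgt_norm].append((src_norm, info["count"]))
--     for tgt in result:
--         result[tgt].sort(key=lambda pair: pair[1], reverse=True)
--     return dict(result)
-- ===== SOURCE B (Python) =====
-- def build_reverse_dictionary(
--     dictionary,
--     min_count=3,
-- ):
--     """Flat-list re-implementation: collect all qualifying (tgt, src, count)
--     triples, sort them once globally by count descending (stable), then fill
--     per-target buckets in one grouping pass."""
--     flat = [(tgt, src, info["count"])
--             for (src, tgt), info in dictionary.items()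
--             if info["count"] >= min_count]
--     result = {tgt: [] for tgt, _, _ in flat}
--     flat.sort(key=lambda t: t[2], reverse=True)
--     for tgt, src, c in flat:
--         result[tgt].append((src, c))
--     return result
-- ===== Notes on version B (the rewrite author's own statement) =====
-- stated objective: alternative
-- what changed: B builds one flat list of (tgt, src, count) triples, sorts it ONCE globally by count descending (stable), and fills pre-seeded per-target buckets in a single grouping pass, instead of A's defaultdict grouping followed by a separate stable sort of every bucket; ties and key order match because the global sort is stable.
import Mathlib
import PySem

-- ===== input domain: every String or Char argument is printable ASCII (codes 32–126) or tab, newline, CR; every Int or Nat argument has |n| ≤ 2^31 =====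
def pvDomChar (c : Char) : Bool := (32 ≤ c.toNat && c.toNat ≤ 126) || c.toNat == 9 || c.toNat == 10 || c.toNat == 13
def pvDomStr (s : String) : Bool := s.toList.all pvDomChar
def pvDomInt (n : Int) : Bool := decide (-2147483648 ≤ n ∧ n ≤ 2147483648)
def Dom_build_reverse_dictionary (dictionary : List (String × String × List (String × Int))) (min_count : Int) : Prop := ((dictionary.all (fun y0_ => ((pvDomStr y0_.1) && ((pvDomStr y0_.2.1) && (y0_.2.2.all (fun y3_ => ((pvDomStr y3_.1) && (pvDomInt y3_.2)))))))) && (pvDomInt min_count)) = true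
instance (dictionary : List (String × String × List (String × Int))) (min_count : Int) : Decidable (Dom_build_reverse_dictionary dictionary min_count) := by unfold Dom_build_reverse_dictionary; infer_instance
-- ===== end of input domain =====

-- B replaces A's per-bucket sorts by ONE stable global sort of the flat (tgt, src, count) list
-- followed by a single grouping pass (objective: alternative algorithm, same result incl. order).

-- info["count"] : exact whenever the info dict has a "count" key (guaranteed by Pre_;
-- on a missing key Python raises KeyError, which Pre_ excludes).
def pvCount (info : List (String × Int)) : Int :=
  ((PySem.Dict.mk info).get? "count").getD 0

-- ===== PORT A =====
def build_reverse_dictionary (dictionary : List (String × String × List (String × Int))) (min_count : Int) : List (String × List (String × Int)) :=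
  -- result = defaultdict(list); for (src, tgt), info: if info["count"] >= min_count: result[tgt].append((src, info["count"]))
  let result : PySem.Dict String (List (String × Int)) :=
    dictionary.foldl (fun d e =>
      if min_count ≤ pvCount e.2.2 then
        d.modify e.2.1 [] (fun l => l ++ [(e.1, pvCount e.2.2)])
      else d) PySem.Dict.empty
  -- for tgt in result: result[tgt].sort(key=..., reverse=True); return dict(result)
  result.items.map (fun kv => (kv.1, PySem.List.sorted kv.2 (fun p => p.2) true))

-- ===== PORT B =====
def build_reverse_dictionary_alt (dictionary : List (String × String × List (String × Int))) (min_count : Int) : List (String × List (String × Int)) :=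
  -- flat = [(tgt, src, info["count"]) for (src, tgt), info in dictionary.items() if info["count"] >= min_count]
  let flat : List (String × String × Int) :=
    (dictionary.filter (fun e => decide (min_count ≤ pvCount e.2.2))).map
      (fun e => (e.2.1, e.1, pvCount e.2.2))
  -- result = {tgt: [] for tgt, _, _ in flat}
  let result0 : PySem.Dict String (List (String × Int)) :=
    flat.foldl (fun d t => d.insert t.1 []) PySem.Dict.empty
  -- flat.sort(key=lambda t: t[2], reverse=True)
  let flatS := PySem.List.sorted flat (fun t => t.2.2) true
  -- for tgt, src, c in flat: result[tgt].append((src, c))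
  let result := flatS.foldl (fun d t => d.modify t.1 [] (fun l => l ++ [(t.2.1, t.2.2)])) result0
  result.items

-- ===== PRECONDITION & SPEC =====
-- Pre_ excludes assoc lists no Python dict input can be (duplicate outer (src,tgt) keys, or
-- duplicate keys inside an info dict) and infos without a "count" key, on which A raises KeyError.
def Pre_build_reverse_dictionary (dictionary : List (String × String × List (String × Int))) (min_count : Int) : Prop :=
  (dictionary.map (fun e => (e.1, e.2.1))).Nodup ∧
  ∀ e ∈ dictionary, (e.2.2.map Prod.fst).Nodup ∧ "count" ∈ e.2.2.map Prod.fst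
instance (dictionary : List (String × String × List (String × Int))) (min_count : Int) : Decidable (Pre_build_reverse_dictionary dictionary min_count) := by unfold Pre_build_reverse_dictionary; infer_instance

def pvWitness_build_reverse_dictionary : (List (String × String × List (String × Int))) × Int :=
  ([("hello", "world", [("count", 5)]), ("hi", "world", [("count", 4)])], 3)

def Spec_build_reverse_dictionary (dictionary : List (String × String × List (String × Int))) (min_count : Int) (out : List (String × List (String × Int))) : Prop := out = build_reverse_dictionary_alt dictionary min_count
instance (dictionary : List (String × String × List (String × Int))) (min_count : Int) (out : List (String × List (String × Int))) : Decidable (Spec_build_reverse_dictionary dictionary min_count out) := by unfold Spec_build_reverse_dictionary; infer_instance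

-- ===== CLAIM (what is proved, stated in full; the proofs are below) =====
def Claim_equal_build_reverse_dictionary : Prop := ∀ (dictionary : List (String × String × List (String × Int))) (min_count : Int), Dom_build_reverse_dictionary dictionary min_count → Pre_build_reverse_dictionary dictionary min_count → Spec_build_reverse_dictionary dictionary min_count (build_reverse_dictionary dictionary min_count)

-- ===== LEMMAS AND PROOFS =====

-- insertBy commutes with a map that preserves the comparison
theorem pv_insertBy_map {α β : Type} (f : α → β) (b : α → α → Bool) (b' : β → β → Bool)
    (h : ∀ a c, b' (f a) (f c) = b a c) (x : α) (ys : List α) :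
    PySem.List.insertBy b' (f x) (ys.map f) = (PySem.List.insertBy b x ys).map f := by
  induction ys with
  | nil => simp [PySem.List.insertBy]
  | cons y ys ih =>
    simp only [List.map_cons, PySem.List.insertBy, h]
    by_cases hb : b x y = true
    · simp [hb]
    · simp [hb, ih]

-- stable sort commutes with a key-preserving map
theorem pv_sorted_rev_map {α β κ : Type} [LinearOrder κ] (f : α → β) (key : β → κ) (m : List α) :
    PySem.List.sorted (m.map f) key true
      = (PySem.List.sorted m (fun x => key (f x)) true).map f := by
  rw [PySem.List.sorted_rev_eq_foldl_insertBy, PySem.List.sorted_rev_eq_foldl_insertBy,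
    List.foldl_map]
  suffices h : ∀ (acc : List α),
      List.foldl (fun acc x => PySem.List.insertBy (fun a b => decide (key b < key a)) (f x) acc)
        (acc.map f) m
      = (List.foldl (fun acc x =>
          PySem.List.insertBy (fun a b => decide (key (f b) < key (f a))) x acc) acc m).map f by
    simpa using h []
  induction m with
  | nil => intro acc; simp
  | cons x m ih =>
    intro acc
    simp only [List.foldl_cons]
    rw [pv_insertBy_map f (fun a c => decide (key (f c) < key (f a)))
      (fun a c => decide (key c < key a)) (fun a c => rfl) x acc]
    exact ih _

theorem pv_insertBy_front {α : Type} (b : α → α → Bool) (x : α) (m : List α)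
    (h : ∀ z ∈ m, b x z = true) : PySem.List.insertBy b x m = x :: m := by
  cases m with
  | nil => rfl
  | cons y ys => simp [PySem.List.insertBy, h y (by simp)]

-- filtering a descending-sorted list commutes with inserting one element (stability)
theorem pv_filter_insertBy {α κ : Type} [LinearOrder κ] (key : α → κ) (p : α → Bool) (x : α) :
    ∀ (m : List α), m.Pairwise (fun a b => key b ≤ key a) →
      (PySem.List.insertBy (fun a b => decide (key b < key a)) x m).filter p
        = if p x then PySem.List.insertBy (fun a b => decide (key b < key a)) x (m.filter p)
          else m.filter p := by
  intro m
  induction m with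
  | nil =>
    intro _
    by_cases hx : p x = true <;> simp [PySem.List.insertBy, List.filter, hx]
  | cons y ys ih =>
    intro hp
    rw [List.pairwise_cons] at hp
    obtain ⟨hy, hys⟩ := hp
    by_cases hb : key y < key x
    · -- x goes in front of y
      have e1 : PySem.List.insertBy (fun a b => decide (key b < key a)) x (y :: ys)
          = x :: y :: ys := by simp [PySem.List.insertBy, hb]
      have e2 : PySem.List.insertBy (fun a b => decide (key b < key a)) x ((y :: ys).filter p)
          = x :: (y :: ys).filter p := by
        apply pv_insertBy_front
        intro z hz
        have hz' : z ∈ y :: ys := List.mem_of_mem_filter hz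
        have hzy : key z ≤ key y := by
          rcases List.mem_cons.mp hz' with h | h
          · exact le_of_eq (by rw [h])
          · exact hy z h
        simpa using lt_of_le_of_lt hzy hb
      rw [e1, e2]
      by_cases hx : p x = true <;> simp [List.filter_cons, hx]
    · -- x goes after y
      have e1 : PySem.List.insertBy (fun a b => decide (key b < key a)) x (y :: ys)
          = y :: PySem.List.insertBy (fun a b => decide (key b < key a)) x ys := by
        simp [PySem.List.insertBy, hb]
      rw [e1]
      by_cases hx : p x = true
      · by_cases hpy : p y = true
        · simp only [List.filter_cons, hpy, if_pos, ih hys, hx]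
          simp [PySem.List.insertBy, hb]
        · simp [hpy, ih hys, hx]
      · simp [List.filter_cons, ih hys, hx]

-- filtering commutes with the stable descending sort
theorem pv_filter_sorted_rev {α κ : Type} [LinearOrder κ] (key : α → κ) (p : α → Bool)
    (l : List α) :
    (PySem.List.sorted l key true).filter p = PySem.List.sorted (l.filter p) key true := by
  induction l using List.reverseRecOn with
  | nil => simp [PySem.List.sorted]
  | append_singleton xs x ih =>
    rw [PySem.List.sorted_rev_eq_foldl_insertBy, List.foldl_append, List.foldl_cons,
      List.foldl_nil, ← PySem.List.sorted_rev_eq_foldl_insertBy]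
    rw [pv_filter_insertBy key p x _ (PySem.List.sorted_pairwise_rev xs key)]
    rw [ih, List.filter_append]
    by_cases hx : p x = true
    · rw [if_pos hx]
      simp only [List.filter_cons, hx, if_pos, List.filter_nil]
      rw [PySem.List.sorted_rev_eq_foldl_insertBy (xs.filter p ++ [x]),
        List.foldl_append, List.foldl_cons, List.foldl_nil,
        ← PySem.List.sorted_rev_eq_foldl_insertBy]
    · rw [if_neg hx]
      simp [List.filter_cons, hx]

-- the seed dict {tgt: [] ...} yields [] for every key
theorem pv_seed_getD {β : Type} (k : String) :
    ∀ (l : List (String × String × Int)) (d : PySem.Dict String (List β)),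
      (∀ j, d.getD j [] = []) →
      (l.foldl (fun d t => d.insert t.1 []) d).getD k [] = [] := by
  intro l
  induction l with
  | nil => intro d hd; exact hd k
  | cons t l ih =>
    intro d hd
    simp only [List.foldl_cons]
    refine ih _ (fun j => ?_)
    rw [PySem.Dict.getD_insert]
    by_cases hj : j = t.1 <;> simp [hj, hd]

-- A's filtered grouping loop is the grouping loop over the flat triple list
theorem pv_groupA (min_count : Int) :
    ∀ (l : List (String × String × List (String × Int)))
      (d : PySem.Dict String (List (String × Int))),
      l.foldl (fun d e =>
        if min_count ≤ pvCount e.2.2 then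
          d.modify e.2.1 [] (fun l => l ++ [(e.1, pvCount e.2.2)])
        else d) d
      = ((l.filter (fun e => decide (min_count ≤ pvCount e.2.2))).map
          (fun e => (e.2.1, e.1, pvCount e.2.2))).foldl
          (fun d t => d.modify t.1 [] (fun l => l ++ [t.2])) d := by
  intro l
  induction l with
  | nil => intro d; rfl
  | cons e l ih =>
    intro d
    by_cases hq : min_count ≤ pvCount e.2.2
    · simp only [List.foldl_cons, List.filter_cons, hq, decide_true, if_true, List.map_cons]
      exact ih _
    · simp only [List.foldl_cons, List.filter_cons, hq, decide_false, if_false,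
        Bool.false_eq_true]
      exact ih _

-- ===== VERDICT (by name: the statement is the Claim_ definition above) =====
theorem build_reverse_dictionary_spec : Claim_equal_build_reverse_dictionary := by
  intro dictionary min_count _hdom _hpre
  unfold Spec_build_reverse_dictionary build_reverse_dictionary build_reverse_dictionary_alt
  dsimp only
  set flat : List (String × String × Int) :=
    (dictionary.filter (fun e => decide (min_count ≤ pvCount e.2.2))).map
      (fun e => (e.2.1, e.1, pvCount e.2.2)) with hflat
  set flatS : List (String × String × Int) :=
    PySem.List.sorted flat (fun t => t.2.2) true with hflatS
  rw [pv_groupA min_count dictionary PySem.Dict.empty, ← hflat]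
  set dA : PySem.Dict String (List (String × Int)) :=
    flat.foldl (fun d t => d.modify t.1 [] (fun l => l ++ [t.2])) PySem.Dict.empty with hdA
  set r0 : PySem.Dict String (List (String × Int)) :=
    flat.foldl (fun d t => d.insert t.1 []) PySem.Dict.empty with hr0
  set dB : PySem.Dict String (List (String × Int)) :=
    flatS.foldl (fun d t => d.modify t.1 [] (fun l => l ++ [t.2])) r0 with hdB
  -- keys and lookups of A's dict
  have hAnodup : dA.keys.Nodup := by
    simpa [hdA] using PySem.Dict.nodup_keys_foldl_modify_key flat (fun t => t.1) []
      (fun _ t l => l ++ [t.2]) PySem.Dict.empty (by simp [PySem.Dict.keys_empty])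
  have hkeysA : dA.keys = PySem.Set.ofList (flat.map (fun t => t.1)) := by
    simpa [hdA, PySem.Dict.keys_empty, PySem.Set.update_nil_left] using
      PySem.Dict.keys_foldl_modify_key flat (fun t => t.1) [] (fun _ t l => l ++ [t.2])
        PySem.Dict.empty
  have hgetA : ∀ k, dA.getD k [] = (flat.filter (fun t => t.1 == k)).map (fun t => t.2) := by
    intro k
    simpa [hdA, PySem.Dict.getD_empty] using
      PySem.Dict.getD_foldl_modify_append flat PySem.Dict.empty k
  -- keys and lookups of B's seed and dict
  have h0nodup : r0.keys.Nodup := by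
    simpa [hr0] using PySem.Dict.nodup_keys_foldl_insert_key flat (fun t => t.1)
      (fun _ _ => []) PySem.Dict.empty (by simp [PySem.Dict.keys_empty])
  have hkeys0 : r0.keys = PySem.Set.ofList (flat.map (fun t => t.1)) := by
    simpa [hr0, PySem.Dict.keys_empty, PySem.Set.update_nil_left] using
      PySem.Dict.keys_foldl_insert_key flat (fun t => t.1) (fun _ _ => []) PySem.Dict.empty
  have hget0 : ∀ k, r0.getD k [] = [] := by
    intro k
    refine pv_seed_getD k flat PySem.Dict.empty (fun j => ?_)
    simp [PySem.Dict.getD_empty]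
  have hBnodup : dB.keys.Nodup := by
    simpa [hdB] using PySem.Dict.nodup_keys_foldl_modify_key flatS (fun t => t.1) []
      (fun _ t l => l ++ [t.2]) r0 h0nodup
  have hkeysB : dB.keys = PySem.Set.ofList (flat.map (fun t => t.1)) := by
    have h1 : dB.keys = PySem.Set.update r0.keys (flatS.map (fun t => t.1)) := by
      simpa [hdB] using PySem.Dict.keys_foldl_modify_key flatS (fun t => t.1) []
        (fun _ t l => l ++ [t.2]) r0
    rw [h1, hkeys0, PySem.Set.update_eq_append_filter]
    have h2 : (PySem.Set.ofList (flatS.map (fun t => t.1))).filter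
        (fun y => !(PySem.Set.ofList (flat.map (fun t => t.1))).contains y) = [] := by
      rw [List.filter_eq_nil_iff]
      intro y hymem
      have hy : y ∈ flatS.map (fun t => t.1) := (PySem.Set.mem_ofList _ _).mp hymem
      obtain ⟨t, ht, rfl⟩ := List.mem_map.mp hy
      have ht' : t ∈ flat := (PySem.List.mem_sorted _ _ _ _).mp ht
      have hmem : t.1 ∈ flat.map (fun t => t.1) := List.mem_map.mpr ⟨t, ht', rfl⟩
      have hsm : t.1 ∈ PySem.Set.ofList (List.map (fun t => t.1) flat) :=
        (PySem.Set.mem_ofList _ _).mpr hmem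
      simp [hsm]
    rw [h2, List.append_nil]
  have hgetB : ∀ k, dB.getD k [] = (flatS.filter (fun t => t.1 == k)).map (fun t => t.2) := by
    intro k
    simpa [hdB, hget0 k] using PySem.Dict.getD_foldl_modify_append flatS r0 k
  -- both items lists as maps over the same key list
  rw [PySem.Dict.items_eq_map_keys dA hAnodup [], PySem.Dict.items_eq_map_keys dB hBnodup [],
    hkeysA, hkeysB, List.map_map]
  simp only [Function.comp_def, hgetA, hgetB]
  -- pointwise bucket equality: stable global sort then filter = filter then sort
  refine List.map_congr_left (fun k _ => ?_)
  have hb : PySem.List.sorted ((flat.filter (fun t => t.1 == k)).map (fun t => t.2))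
        (fun p => p.2) true
      = (flatS.filter (fun t => t.1 == k)).map (fun t => t.2) := by
    rw [hflatS, pv_filter_sorted_rev (fun t => t.2.2) (fun t => t.1 == k) flat,
      pv_sorted_rev_map (fun t : String × String × Int => t.2) (fun p : String × Int => p.2)
        (flat.filter (fun t => t.1 == k))]
  rw [hb]
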